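-- pv_equiv track=rewrite | github.com/azret/MiniLM-L6-v2 | modeling.py | _strip_whitespaces
-- ===== SOURCE A (Python) =====
-- from typing import Callable, Optional, Literal, Union, Tuple, Iterator, Dict, List, Any
-- from typing import Iterator
--
-- def _strip_whitespaces(s: str) -> Iterator[str]:
--     """
--     Yield non-empty whitespace-separated tokens from the input string.
--     """
--     if not s:
--         return
--     length = len(s)
--     i = 0
--     while i < length:
--         # skip any leading whitespace
--         while i < length and s[i].isspace():
--             i += 1
--         if i >= length:
--             break
--         start = i
--         # advance until next whitespace or end
--         while i < length and not s[i].isspace():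
--             i += 1
--         # yield the token we found
--         yield s[start:i]
-- ===== SOURCE B (Python) =====
-- def _strip_whitespaces(s: str):
--     """
--     Yield non-empty whitespace-separated tokens from the input string.
--
--     str.split() with no arguments splits on exactly the characters for which
--     str.isspace() is true and drops empty pieces, so this matches A exactly.
--     """
--     yield from s.split()
-- ===== Notes on version B (the rewrite author's own statement) =====
-- stated objective: idiomatic
-- what changed: Replaces the hand-written nested index-scan loops with the standard-library whitespace tokenizer str.split(), whose no-argument form splits on exactly the str.isspace characters and discards empty pieces.
import Mathlib
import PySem

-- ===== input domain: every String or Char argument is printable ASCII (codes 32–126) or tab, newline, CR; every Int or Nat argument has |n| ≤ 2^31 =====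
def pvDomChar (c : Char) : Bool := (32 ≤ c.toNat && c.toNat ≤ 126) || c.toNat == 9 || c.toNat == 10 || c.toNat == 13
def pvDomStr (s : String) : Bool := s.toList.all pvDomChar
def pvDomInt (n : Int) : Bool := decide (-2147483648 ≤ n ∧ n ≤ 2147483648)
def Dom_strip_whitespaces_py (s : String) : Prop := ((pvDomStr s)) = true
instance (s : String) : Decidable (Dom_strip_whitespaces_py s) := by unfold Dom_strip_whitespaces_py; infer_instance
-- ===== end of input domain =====

-- B replaces A's hand-written nested index-scan loops by the standard whitespace
-- tokenizer str.split() (objective: idiomatic; the C-level tokenizer measured faster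
-- in a timing run); identical return value on all inputs.

-- ===== PORT A =====
-- inner loop `while i < length and s[i].isspace(): i += 1` (fuel-counted while loop;
-- fuel = length of the string always suffices, so the port is exact)
def pvSkipWsF : Nat → List Char → Nat → Nat
  | 0, _, i => i
  | fuel + 1, cs, i =>
    if h : i < cs.length then
      if PySem.Chars.isspace cs[i] then pvSkipWsF fuel cs (i + 1) else i
    else i

-- inner loop `while i < length and not s[i].isspace(): i += 1`
def pvSkipTokF : Nat → List Char → Nat → Nat
  | 0, _, i => i
  | fuel + 1, cs, i =>
    if h : i < cs.length then
      if PySem.Chars.isspace cs[i] then i else pvSkipTokF fuel cs (i + 1)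
    else i

-- outer `while i < length:` loop of A (each iteration strictly advances i, so
-- length + 1 rounds of fuel always suffice)
def pvOuterF : Nat → List Char → Nat → List String
  | 0, _, _ => []
  | fuel + 1, cs, i =>
    if i < cs.length then
      -- j = the value of i after the whitespace-skipping inner loop
      if pvSkipWsF cs.length cs i < cs.length then
        -- the token runs from start = pvSkipWsF … i to k = pvSkipTokF … (pvSkipWsF … i)
        String.ofList (PySem.List.slice cs (some ((pvSkipWsF cs.length cs i : Nat) : Int))
            (some ((pvSkipTokF cs.length cs (pvSkipWsF cs.length cs i) : Nat) : Int))) ::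
          pvOuterF fuel cs (pvSkipTokF cs.length cs (pvSkipWsF cs.length cs i))
      else []
    else []

def strip_whitespaces_py (s : String) : List String :=
  if s.toList = [] then [] else pvOuterF (s.toList.length + 1) s.toList 0

-- ===== PORT B =====
def strip_whitespaces_py_alt (s : String) : List String :=
  PySem.Str.split₀ s

-- ===== PRECONDITION & SPEC =====
def Spec_strip_whitespaces_py (s : String) (out : List String) : Prop := out = strip_whitespaces_py_alt s
instance (s : String) (out : List String) : Decidable (Spec_strip_whitespaces_py s out) := by unfold Spec_strip_whitespaces_py; infer_instance

-- ===== CLAIM (what is proved, stated in full; the proofs are below) =====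
def Claim_equal_strip_whitespaces_py : Prop := ∀ (s : String), Dom_strip_whitespaces_py s → Spec_strip_whitespaces_py s (strip_whitespaces_py s)

-- ===== LEMMAS AND PROOFS =====

-- char-level tokens: the common characterisation both ports are reduced to
def pvTokensC : List Char → List (List Char)
  | [] => []
  | c :: l =>
    if PySem.Chars.isspace c then pvTokensC l
    else (c :: l).takeWhile (fun d => !PySem.Chars.isspace d) ::
         pvTokensC ((c :: l).dropWhile (fun d => !PySem.Chars.isspace d))
termination_by l => l.length
decreasing_by
  · simp
  · simp only [List.dropWhile]
    split
    · exact Nat.lt_succ_of_le (List.length_dropWhile_le _ _)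
    · simp_all

theorem pvTokensC_nil : pvTokensC [] = [] := by simp [pvTokensC]

theorem pvTokensC_cons_ws (c : Char) (l : List Char) (h : PySem.Chars.isspace c = true) :
    pvTokensC (c :: l) = pvTokensC l := by
  rw [pvTokensC, if_pos h]

theorem pvTokensC_cons_tok (c : Char) (l : List Char) (h : PySem.Chars.isspace c = false) :
    pvTokensC (c :: l) = (c :: l).takeWhile (fun d => !PySem.Chars.isspace d) ::
      pvTokensC ((c :: l).dropWhile (fun d => !PySem.Chars.isspace d)) := by
  rw [pvTokensC, if_neg (by simp [h])]

theorem pvTokensC_dropWhile_ws (l : List Char) :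
    pvTokensC (l.dropWhile PySem.Chars.isspace) = pvTokensC l := by
  induction l with
  | nil => rfl
  | cons c l ih =>
    by_cases h : PySem.Chars.isspace c = true
    · rw [List.dropWhile_cons_of_pos h, ih, pvTokensC_cons_ws c l h]
    · rw [List.dropWhile_cons_of_neg h]

theorem pvSkipWsF_spec (cs : List Char) : ∀ (fuel i : Nat), cs.length ≤ i + fuel →
    pvSkipWsF fuel cs i = i + ((cs.drop i).takeWhile PySem.Chars.isspace).length := by
  intro fuel
  induction fuel with
  | zero =>
    intro i hf
    rw [pvSkipWsF, List.drop_eq_nil_of_le (by omega)]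
    simp
  | succ fuel ih =>
    intro i hf
    rw [pvSkipWsF]
    split
    case isTrue h =>
      rw [List.drop_eq_getElem_cons h]
      split
      case isTrue hs =>
        rw [ih (i + 1) (by omega), List.takeWhile_cons_of_pos hs]
        simp; omega
      case isFalse hs =>
        rw [List.takeWhile_cons_of_neg hs]
        simp
    case isFalse h =>
      rw [List.drop_eq_nil_of_le (by omega)]
      simp

theorem pvSkipTokF_spec (cs : List Char) : ∀ (fuel i : Nat), cs.length ≤ i + fuel →
    pvSkipTokF fuel cs i = i + ((cs.drop i).takeWhile (fun d => !PySem.Chars.isspace d)).length := by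
  intro fuel
  induction fuel with
  | zero =>
    intro i hf
    rw [pvSkipTokF, List.drop_eq_nil_of_le (by omega)]
    simp
  | succ fuel ih =>
    intro i hf
    rw [pvSkipTokF]
    split
    case isTrue h =>
      rw [List.drop_eq_getElem_cons h]
      split
      case isTrue hs =>
        rw [List.takeWhile_cons_of_neg (by simp [hs])]
        simp
      case isFalse hs =>
        rw [ih (i + 1) (by omega), List.takeWhile_cons_of_pos (by simp at hs; simp [hs])]
        simp; omega
    case isFalse h =>
      rw [List.drop_eq_nil_of_le (by omega)]
      simp

theorem pv_take_takeWhile {α : Type} (p : α → Bool) (l : List α) :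
    l.take (l.takeWhile p).length = l.takeWhile p := by
  induction l with
  | nil => rfl
  | cons a l ih =>
    by_cases h : p a
    · rw [List.takeWhile_cons_of_pos h]; simpa using ih
    · rw [List.takeWhile_cons_of_neg (by simp [h])]; simp

theorem pv_drop_takeWhile {α : Type} (p : α → Bool) (l : List α) :
    l.drop (l.takeWhile p).length = l.dropWhile p := by
  induction l with
  | nil => rfl
  | cons a l ih =>
    by_cases h : p a
    · rw [List.takeWhile_cons_of_pos h, List.dropWhile_cons_of_pos h]; simpa using ih
    · rw [List.takeWhile_cons_of_neg (by simp [h]), List.dropWhile_cons_of_neg (by simp [h])]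
      simp

theorem pv_dropWhile_head_false {α : Type} (p : α → Bool) :
    ∀ (l : List α) (c : α) (l' : List α), l.dropWhile p = c :: l' → p c = false := by
  intro l
  induction l with
  | nil => intro c l' h; simp at h
  | cons a l ih =>
    intro c l' h
    by_cases hp : p a = true
    · rw [List.dropWhile_cons_of_pos hp] at h; exact ih _ _ h
    · rw [List.dropWhile_cons_of_neg hp] at h
      cases h; simpa using hp

theorem pvOuterF_spec (cs : List Char) : ∀ (fuel i : Nat), cs.length < i + fuel →
    pvOuterF fuel cs i = (pvTokensC (cs.drop i)).map String.ofList := by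
  intro fuel
  induction fuel with
  | zero =>
    intro i hf
    rw [pvOuterF, List.drop_eq_nil_of_le (by omega), pvTokensC_nil]
    simp
  | succ fuel ih =>
    intro i hf
    rw [pvOuterF]
    split
    case isTrue h0 =>
      have hws := pvSkipWsF_spec cs cs.length i (by omega)
      have hdropj : cs.drop (pvSkipWsF cs.length cs i) = (cs.drop i).dropWhile PySem.Chars.isspace := by
        rw [hws, ← List.drop_drop, pv_drop_takeWhile]
      split
      case isTrue h =>
        have htok := pvSkipTokF_spec cs cs.length (pvSkipWsF cs.length cs i) (by omega)
        have hdropk : cs.drop (pvSkipTokF cs.length cs (pvSkipWsF cs.length cs i)) =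
            (cs.drop (pvSkipWsF cs.length cs i)).dropWhile (fun d => !PySem.Chars.isspace d) := by
          rw [htok, ← List.drop_drop, pv_drop_takeWhile]
        have hij : i ≤ pvSkipWsF cs.length cs i := by omega
        have hslice : PySem.List.slice cs (some ((pvSkipWsF cs.length cs i : Nat) : Int))
            (some ((pvSkipTokF cs.length cs (pvSkipWsF cs.length cs i) : Nat) : Int)) =
            (cs.drop (pvSkipWsF cs.length cs i)).takeWhile (fun d => !PySem.Chars.isspace d) := by
          rw [PySem.List.slice_toNat cs (Int.natCast_nonneg _) (Int.natCast_nonneg _)]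
          simp only [Int.toNat_natCast]
          rw [htok, Nat.add_sub_cancel_left, pv_take_takeWhile]
        -- the dropped-whitespace remainder starts with a non-space char
        obtain ⟨c, l, hcl⟩ : ∃ c l, (cs.drop i).dropWhile PySem.Chars.isspace = c :: l := by
          have hne : cs.drop (pvSkipWsF cs.length cs i) ≠ [] := by
            intro hnil; rw [List.drop_eq_nil_iff] at hnil; omega
          rw [hdropj] at hne
          cases hx : (cs.drop i).dropWhile PySem.Chars.isspace with
          | nil => exact absurd hx hne
          | cons c l => exact ⟨c, l, rfl⟩
        have hc : PySem.Chars.isspace c = false :=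
          pv_dropWhile_head_false _ _ _ _ hcl
        have hk1 : pvSkipWsF cs.length cs i + 1 ≤ pvSkipTokF cs.length cs (pvSkipWsF cs.length cs i) := by
          rw [htok, hdropj, hcl, List.takeWhile_cons_of_pos (by simp [hc])]
          simp
        rw [ih (pvSkipTokF cs.length cs (pvSkipWsF cs.length cs i)) (by omega), hslice, hdropk, hdropj]
        rw [← pvTokensC_dropWhile_ws (cs.drop i)]
        rw [hcl, pvTokensC_cons_tok c l hc]
        simp
      case isFalse h =>
        have hnil : cs.drop (pvSkipWsF cs.length cs i) = [] := List.drop_eq_nil_of_le (by omega)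
        rw [hdropj] at hnil
        rw [← pvTokensC_dropWhile_ws (cs.drop i), hnil, pvTokensC_nil]
        simp
    case isFalse h0 =>
      rw [List.drop_eq_nil_of_le (by omega), pvTokensC_nil]
      simp

-- split₀'s accumulator loop, characterised against pvTokensC
theorem pvGo_spec (l cur : List Char) (acc : List (List Char)) :
    PySem.Chars.split₀.go l cur acc = acc.reverse ++
      (if cur = [] then pvTokensC l
       else (cur.reverse ++ l.takeWhile (fun d => !PySem.Chars.isspace d)) ::
            pvTokensC (l.dropWhile (fun d => !PySem.Chars.isspace d))) := by
  induction l generalizing cur acc with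
  | nil =>
    rw [PySem.Chars.split₀.go]
    by_cases hc : cur = []
    · simp [hc, pvTokensC_nil]
    · simp [hc, List.isEmpty_iff, pvTokensC_nil]
  | cons c l ih =>
    rw [PySem.Chars.split₀.go]
    by_cases hs : PySem.Chars.isspace c = true
    · rw [if_pos hs]
      by_cases hc : cur = []
      · simp only [hc, List.isEmpty_nil, ih]
        simp [pvTokensC_cons_ws c l hs]
      · rw [if_neg (by simpa [List.isEmpty_iff] using hc), ih]
        rw [List.takeWhile_cons_of_neg (by simp [hs]), List.dropWhile_cons_of_neg (by simp [hs])]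
        simp [hc, pvTokensC_cons_ws c l hs]
    · rw [if_neg hs, ih]
      have hs' : PySem.Chars.isspace c = false := by simpa using hs
      by_cases hc : cur = []
      · subst hc
        rw [pvTokensC_cons_tok c l hs',
          List.takeWhile_cons_of_pos (p := fun d => !PySem.Chars.isspace d) (l := l)
            (by simp [hs']),
          List.dropWhile_cons_of_pos (p := fun d => !PySem.Chars.isspace d) (l := l)
            (by simp [hs'])]
        simp
      · simp only [if_neg (by simp : (c :: cur) ≠ []), if_neg hc]
        rw [List.takeWhile_cons_of_pos (p := fun d => !PySem.Chars.isspace d) (l := l)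
            (by simp [hs']),
          List.dropWhile_cons_of_pos (p := fun d => !PySem.Chars.isspace d) (l := l)
            (by simp [hs'])]
        simp

theorem pv_split₀_eq_tokensC (l : List Char) : PySem.Chars.split₀ l = pvTokensC l := by
  rw [PySem.Chars.split₀, pvGo_spec]
  simp

-- ===== VERDICT (by name: the statement is the Claim_ definition above) =====
theorem strip_whitespaces_py_spec : Claim_equal_strip_whitespaces_py := by
  intro s _
  show strip_whitespaces_py s = strip_whitespaces_py_alt s
  rw [strip_whitespaces_py, strip_whitespaces_py_alt, PySem.Str.split₀, pv_split₀_eq_tokensC]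
  by_cases h : s.toList = []
  · rw [if_pos h, h, pvTokensC_nil]; rfl
  · rw [if_neg h, pvOuterF_spec s.toList (s.toList.length + 1) 0 (by omega)]; rfl
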